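-- pv_equiv track=rewrite | github.com/tomas-oliveira03/AdventOfCode | Day2/Part2/main.py | checkValidReports
-- ===== SOURCE A (Python) =====
-- def checkValidReports(listOfReports):
--     count = 0
--     for i in range(len(listOfReports)):
--         allPossibilitiesOfLevels = [listOfReports[i][:j] + listOfReports[i][j+1:] for j in range(len(listOfReports[i]))]
--         for permutation in allPossibilitiesOfLevels:
--             if permutation == sorted(permutation) or permutation == sorted(permutation, reverse=True):
--
--                 isValid = True
--                 for k in range(len(permutation) - 1):
--                     if abs(permutation[k] - permutation[k+1]) < 1 or abs(permutation[k] - permutation[k+1]) > 3: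
--                         isValid = False
--                         break
--                 if isValid:
--                     count += 1
--                     break
--     return count
-- ===== SOURCE B (Python) =====
-- def _repairableDir(r, lo, hi):
--     # prefix/suffix validity flags for diffs d with lo <= d <= hi
--     n = len(r)
--     pre = [True] * n
--     for k in range(1, n):
--         pre[k] = pre[k - 1] and lo <= r[k] - r[k - 1] <= hi
--     suf = [True] * n
--     for k in range(n - 2, -1, -1):
--         suf[k] = suf[k + 1] and lo <= r[k + 1] - r[k] <= hi
--     for j in range(n):
--         left = pre[j - 1] if j > 0 else True
--         right = suf[j + 1] if j < n - 1 else True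
--         link = (lo <= r[j + 1] - r[j - 1] <= hi) if 0 < j < n - 1 else True
--         if left and right and link:
--             return True
--     return False
--
--
-- def checkValidReports(listOfReports):
--     count = 0
--     for r in listOfReports:
--         if _repairableDir(r, 1, 3) or _repairableDir(r, -3, -1):
--             count += 1
--     return count
-- ===== Notes on version B (the rewrite author's own statement) =====
-- stated objective: faster
-- what changed: A re-checks every one-element-removed copy from scratch (slice, two sorts, a rescan) per report; B makes one linear pass per report computing prefix/suffix validity flags for each direction, so each removal is decided in O(1) without building or sorting any candidate list.
import Mathlib
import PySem

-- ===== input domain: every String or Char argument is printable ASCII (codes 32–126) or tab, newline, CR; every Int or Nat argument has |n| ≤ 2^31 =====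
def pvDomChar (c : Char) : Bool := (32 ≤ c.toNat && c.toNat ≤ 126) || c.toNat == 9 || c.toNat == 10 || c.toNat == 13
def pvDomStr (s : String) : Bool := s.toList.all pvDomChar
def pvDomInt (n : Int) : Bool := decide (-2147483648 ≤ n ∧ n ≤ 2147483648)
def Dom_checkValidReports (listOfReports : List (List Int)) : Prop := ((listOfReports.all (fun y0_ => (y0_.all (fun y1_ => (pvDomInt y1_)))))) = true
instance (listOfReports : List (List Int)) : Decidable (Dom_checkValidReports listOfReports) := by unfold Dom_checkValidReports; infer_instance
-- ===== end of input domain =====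

-- B replaces A's per-removal slice+sort+rescan (O(m² log m) per report) by prefix/suffix
-- validity flags that decide every removal in O(1), an O(m) pass per report.

-- ===== PORT A =====
-- the k-loop over adjacent pairs with its early break
def aAdj : List Int → Bool
  | a :: b :: t => if |a - b| < 1 || |a - b| > 3 then false else aAdj (b :: t)
  | _ => true

-- the 'for permutation in allPossibilitiesOfLevels' loop with its break on the first valid one
def aScan : List (List Int) → Bool
  | [] => false
  | p :: rest =>
    if p = PySem.List.sorted p (fun x => x) false ∨ p = PySem.List.sorted p (fun x => x) true then
      if aAdj p then true else aScan rest
    else aScan rest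

def checkValidReports (listOfReports : List (List Int)) : Int :=
  (PySem.List.pyRange 0 listOfReports.length 1).foldl (fun count i =>
    let r := PySem.List.pyGetD listOfReports i []
    let allPossibilitiesOfLevels := (PySem.List.pyRange 0 r.length 1).map (fun j =>
      PySem.List.slice r none (some j) ++ PySem.List.slice r (some (j + 1)) none)
    if aScan allPossibilitiesOfLevels then count + 1 else count) 0

-- ===== PORT B =====
-- _flags: the prev/acc loop of Source B (inner steps once 'prev' is set)
def bFlagsGo (lo hi : Int) (acc : Bool) (prev : Int) : List Int → List Bool
  | [] => []
  | x :: t =>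
    let acc' := acc && (decide (lo ≤ x - prev) && decide (x - prev ≤ hi))
    acc' :: bFlagsGo lo hi acc' x t

def bFlags (lo hi : Int) : List Int → List Bool
  | [] => []
  | x :: t => true :: bFlagsGo lo hi true x t

-- _repairableDir: pre/suf flag lists, then the j-loop with early return (ported as .any)
def bRepairableDir (r : List Int) (lo hi : Int) : Bool :=
  let n : Int := r.length
  let pre := bFlags lo hi r
  let suf := (bFlags (-hi) (-lo) r.reverse).reverse   -- r[::-1] is reverse (slice?_none_none_neg_one)
  (PySem.List.pyRange 0 n 1).any (fun j =>
    (if 0 < j then PySem.List.pyGetD pre (j - 1) true else true) &&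
    ((if j < n - 1 then PySem.List.pyGetD suf (j + 1) true else true) &&
     (if 0 < j ∧ j < n - 1 then
        decide (lo ≤ PySem.List.pyGetD r (j + 1) 0 - PySem.List.pyGetD r (j - 1) 0) &&
        decide (PySem.List.pyGetD r (j + 1) 0 - PySem.List.pyGetD r (j - 1) 0 ≤ hi)
      else true)))

def checkValidReports_alt (listOfReports : List (List Int)) : Int :=
  listOfReports.foldl (fun count r =>
    if bRepairableDir r 1 3 || bRepairableDir r (-3) (-1) then count + 1 else count) 0

-- ===== PRECONDITION & SPEC =====
def Spec_checkValidReports (listOfReports : List (List Int)) (out : Int) : Prop := out = checkValidReports_alt listOfReports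
instance (listOfReports : List (List Int)) (out : Int) : Decidable (Spec_checkValidReports listOfReports out) := by unfold Spec_checkValidReports; infer_instance

-- ===== CLAIM (what is proved, stated in full; the proofs are below) =====
def Claim_equal_checkValidReports : Prop := ∀ (listOfReports : List (List Int)), Dom_checkValidReports listOfReports → Spec_checkValidReports listOfReports (checkValidReports listOfReports)

-- ===== LEMMAS AND PROOFS =====

def chainB (f : Int → Int → Bool) : List Int → Bool
  | a :: b :: t => f a b && chainB f (b :: t)
  | _ => true

def okD (lo hi a b : Int) : Bool := decide (lo ≤ b - a) && decide (b - a ≤ hi)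

def adjF (a b : Int) : Bool := !(decide (|a - b| < 1) || decide (|a - b| > 3))

theorem aAdj_eq (l : List Int) : aAdj l = chainB adjF l := by
  induction l with
  | nil => rfl
  | cons a t ih =>
    cases t with
    | nil => rfl
    | cons b t' =>
      simp only [aAdj, chainB, adjF] at ih ⊢
      by_cases h : (|a - b| < 1 ∨ |a - b| > 3) <;> simp [*]

theorem aScan_eq (l : List (List Int)) :
    aScan l = l.any (fun p =>
      decide (p = PySem.List.sorted p (fun x => x) false ∨ p = PySem.List.sorted p (fun x => x) true)
      && aAdj p) := by
  induction l with
  | nil => rfl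
  | cons p rest ih =>
    simp only [aScan, List.any_cons, ← ih]
    split_ifs <;> simp [*]

theorem okD_inc_eq (a b : Int) : okD 1 3 a b = (decide (a ≤ b) && adjF a b) := by
  rw [Bool.eq_iff_iff]
  simp only [okD, adjF, Bool.and_eq_true,
    Bool.not_eq_true', Bool.or_eq_false_iff, decide_eq_true_eq, decide_eq_false_iff_not]
  rcases abs_cases (a - b) with ⟨he, h0⟩ | ⟨he, h0⟩ <;> rw [he] <;> omega

theorem okD_dec_eq (a b : Int) : okD (-3) (-1) a b = (decide (b ≤ a) && adjF a b) := by
  rw [Bool.eq_iff_iff]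
  simp only [okD, adjF, Bool.and_eq_true,
    Bool.not_eq_true', Bool.or_eq_false_iff, decide_eq_true_eq, decide_eq_false_iff_not]
  rcases abs_cases (a - b) with ⟨he, h0⟩ | ⟨he, h0⟩ <;> rw [he] <;> omega

theorem chainB_iff_chain (f : Int → Int → Bool) (l : List Int) :
    chainB f l = true ↔ List.IsChain (fun a b => f a b = true) l := by
  induction l with
  | nil => simp [chainB]
  | cons a t ih =>
    cases t with
    | nil => simp [chainB]
    | cons b t' => simp [chainB, List.isChain_cons_cons] at ih ⊢; tauto

theorem chainB_ext {f g : Int → Int → Bool} (h : ∀ a b, f a b = g a b) (l : List Int) :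
    chainB f l = chainB g l := by
  induction l with
  | nil => rfl
  | cons a t ih =>
    cases t with
    | nil => rfl
    | cons b t' => simp only [chainB, h] at ih ⊢; rw [ih]

theorem chainB_and (f g : Int → Int → Bool) (l : List Int) :
    chainB (fun a b => f a b && g a b) l = (chainB f l && chainB g l) := by
  induction l with
  | nil => rfl
  | cons a t ih =>
    cases t with
    | nil => rfl
    | cons b t' =>
      simp only [chainB] at ih ⊢
      rw [ih]; cases f a b <;> cases g a b <;> simp

theorem sorted_id_iff (p : List Int) :
    p = PySem.List.sorted p (fun x => x) false ↔ chainB (fun a b => decide (a ≤ b)) p = true := by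
  rw [chainB_iff_chain]
  simp only [decide_eq_true_eq]
  rw [List.isChain_iff_pairwise]
  constructor
  · intro h; rw [h]; exact PySem.List.sorted_pairwise p (fun x => x)
  · intro h; exact (PySem.List.sorted_eq_self_of_pairwise p (fun x => x) h).symm

theorem sorted_rev_iff (p : List Int) :
    p = PySem.List.sorted p (fun x => x) true ↔ chainB (fun a b => decide (b ≤ a)) p = true := by
  rw [chainB_iff_chain]
  simp only [decide_eq_true_eq]
  rw [List.isChain_iff_pairwise]
  constructor
  · intro h; rw [h]; exact PySem.List.sorted_pairwise_rev p (fun x => x)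
  · intro h; exact (PySem.List.sorted_rev_eq_self_of_pairwise p (fun x => x) h).symm

theorem aValid_eq (p : List Int) :
    (decide (p = PySem.List.sorted p (fun x => x) false ∨ p = PySem.List.sorted p (fun x => x) true)
      && aAdj p)
    = (chainB (okD 1 3) p || chainB (okD (-3) (-1)) p) := by
  rw [aAdj_eq, chainB_ext okD_inc_eq p, chainB_ext okD_dec_eq p, chainB_and, chainB_and,
    Bool.eq_iff_iff]
  simp only [Bool.and_eq_true, Bool.or_eq_true, decide_eq_true_eq, sorted_id_iff, sorted_rev_iff]
  tauto

theorem length_bFlagsGo (lo hi : Int) (acc : Bool) (prev : Int) (t : List Int) :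
    (bFlagsGo lo hi acc prev t).length = t.length := by
  induction t generalizing acc prev with
  | nil => rfl
  | cons x t ih => simp [bFlagsGo, ih]

theorem length_bFlags (lo hi : Int) (r : List Int) : (bFlags lo hi r).length = r.length := by
  cases r with
  | nil => rfl
  | cons x t => simp [bFlags, length_bFlagsGo]

theorem bFlagsGo_getD (lo hi : Int) (t : List Int) (acc : Bool) (prev : Int) (k : Nat) (d : Bool)
    (hk : k < t.length) :
    (bFlagsGo lo hi acc prev t).getD k d = (acc && chainB (okD lo hi) (prev :: t.take (k + 1))) := by
  induction t generalizing acc prev k with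
  | nil => simp at hk
  | cons x t ih =>
    cases k with
    | zero =>
      simp [bFlagsGo, chainB, okD]
    | succ k =>
      simp only [bFlagsGo, List.getD_cons_succ]
      rw [ih _ _ k (by simpa using hk)]
      simp only [List.take, chainB, okD]
      cases acc <;> simp [Bool.and_assoc]

theorem bFlags_getD (lo hi : Int) (r : List Int) (k : Nat) (d : Bool) (hk : k < r.length) :
    (bFlags lo hi r).getD k d = chainB (okD lo hi) (r.take (k + 1)) := by
  cases r with
  | nil => simp at hk
  | cons x t =>
    cases k with
    | zero => simp [bFlags, chainB]
    | succ k =>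
      simp only [bFlags, List.getD_cons_succ, List.take]
      rw [bFlagsGo_getD lo hi t true x k d (by simpa using hk)]
      simp

def linkB (f : Int → Int → Bool) : Option Int → Option Int → Bool
  | some a, some b => f a b
  | _, _ => true

theorem chainB_append (f : Int → Int → Bool) (xs ys : List Int) :
    chainB f (xs ++ ys) = (chainB f xs && chainB f ys && linkB f xs.getLast? ys.head?) := by
  induction xs with
  | nil => simp [chainB, linkB]
  | cons a t ih =>
    cases t with
    | nil =>
      cases ys with
      | nil => simp [chainB, linkB]
      | cons y ys' => simp [chainB, linkB, Bool.and_comm]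
    | cons b t' =>
      simp only [List.cons_append, chainB] at ih ⊢
      rw [ih]
      simp [Bool.and_assoc, List.getLast?_cons_cons]

theorem okD_flip (lo hi a b : Int) : okD (-hi) (-lo) b a = okD lo hi a b := by
  rw [Bool.eq_iff_iff]; simp [okD]; omega

theorem chainB_reverse (lo hi : Int) (l : List Int) :
    chainB (okD (-hi) (-lo)) l.reverse = chainB (okD lo hi) l := by
  induction l with
  | nil => rfl
  | cons a t ih =>
    rw [List.reverse_cons, chainB_append, ih]
    cases t with
    | nil => simp [chainB, linkB]
    | cons b t' =>
      simp only [List.getLast?_reverse, List.head?, linkB, chainB]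
      rw [okD_flip]
      cases okD lo hi a b <;> simp [Bool.and_comm]

theorem suf_getD (lo hi : Int) (r : List Int) (j : Nat) (d : Bool) (hj : j < r.length) :
    ((bFlags (-hi) (-lo) r.reverse).reverse).getD j d = chainB (okD lo hi) (r.drop j) := by
  have hlen : (bFlags (-hi) (-lo) r.reverse).length = r.length := by
    rw [length_bFlags, List.length_reverse]
  rw [List.getD_reverse _ (by rw [hlen]; exact hj)]
  rw [hlen]
  rw [bFlags_getD _ _ _ _ _ (by simp; omega)]
  have htake : r.reverse.take (r.length - 1 - j + 1) = (r.drop j).reverse := by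
    rw [List.take_reverse]
    have h2 : r.length - (r.length - 1 - j + 1) = j := by omega
    rw [h2]
  rw [htake, chainB_reverse]

theorem any_congr_mem {α : Type} {l : List α} {p q : α → Bool} (h : ∀ a ∈ l, p a = q a) :
    l.any p = l.any q := by
  induction l with
  | nil => rfl
  | cons x t ih =>
    simp only [List.any_cons]
    rw [h x (by simp), ih (fun a ha => h a (by simp [ha]))]

theorem any_or_distrib {α : Type} (l : List α) (p q : α → Bool) :
    l.any (fun x => p x || q x) = (l.any p || l.any q) := by
  induction l with
  | nil => rfl
  | cons x t ih =>
    simp only [List.any_cons, ih]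
    cases p x <;> cases q x <;> simp

theorem bRep_eq (r : List Int) (lo hi : Int) :
    bRepairableDir r lo hi
      = (PySem.List.pyRange 0 (r.length : Int) 1).any (fun j =>
          chainB (okD lo hi) (r.take j.toNat ++ r.drop (j.toNat + 1))) := by
  simp only [bRepairableDir]
  apply any_congr_mem
  intro j hj
  rw [PySem.List.mem_pyRange_one] at hj
  obtain ⟨hj0, hjn⟩ := hj
  set k := j.toNat with hk
  have hkn : k < r.length := by omega
  rw [chainB_append]
  by_cases h0 : 0 < j
  · have hk1 : 1 ≤ k := by omega
    have e1 : j - 1 = ((k - 1 : Nat) : Int) := by omega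
    have hlast : (r.take k).getLast? = some (r.getD (k - 1) 0) := by
      rw [List.getLast?_eq_getElem?, List.length_take, Nat.min_eq_left (by omega),
        List.getElem?_take, if_pos (by omega), List.getElem?_eq_getElem (by omega),
        List.getD_eq_getElem r 0 (by omega)]
    by_cases h1 : j < (r.length : Int) - 1
    · have e2 : j + 1 = ((k + 1 : Nat) : Int) := by omega
      have hhead : (r.drop (k + 1)).head? = some (r.getD (k + 1) 0) := by
        rw [List.head?_drop, List.getElem?_eq_getElem (by omega),
          List.getD_eq_getElem r 0 (by omega)]
      rw [if_pos h0, if_pos h1, if_pos ⟨h0, h1⟩, e1, e2]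
      simp only [PySem.List.pyGetD_natCast]
      rw [bFlags_getD _ _ _ _ _ (by omega), suf_getD _ _ _ _ _ (by omega)]
      have ek : k - 1 + 1 = k := by omega
      rw [ek, hlast, hhead]
      simp [linkB, okD, Bool.and_assoc]
    · have hkl : k + 1 = r.length := by omega
      have hdrop : r.drop (k + 1) = [] := by rw [hkl]; exact List.drop_length
      rw [if_pos h0, if_neg h1, if_neg (by tauto), e1]
      simp only [PySem.List.pyGetD_natCast]
      rw [bFlags_getD _ _ _ _ _ (by omega)]
      have ek : k - 1 + 1 = k := by omega
      rw [ek, hdrop, hlast]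
      simp [linkB, chainB]
  · have hk0 : k = 0 := by omega
    by_cases h1 : j < (r.length : Int) - 1
    · have e2 : j + 1 = ((k + 1 : Nat) : Int) := by omega
      rw [if_neg h0, if_pos h1, if_neg (fun hc => h0 hc.1), e2]
      simp only [PySem.List.pyGetD_natCast]
      rw [suf_getD _ _ _ _ _ (by omega)]
      simp [hk0, linkB, chainB]
    · have hkl : k + 1 = r.length := by omega
      have hdrop : r.drop (k + 1) = [] := by rw [hkl]; exact List.drop_length
      rw [if_neg h0, if_neg h1, if_neg (fun hc => h0 hc.1), hdrop]
      simp [hk0, linkB, chainB]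

theorem cond_eq (r : List Int) :
    aScan ((PySem.List.pyRange 0 (r.length : Int) 1).map (fun j =>
      PySem.List.slice r none (some j) ++ PySem.List.slice r (some (j + 1)) none))
    = (bRepairableDir r 1 3 || bRepairableDir r (-3) (-1)) := by
  rw [aScan_eq, List.any_map, bRep_eq, bRep_eq, ← any_or_distrib]
  apply any_congr_mem
  intro j hj
  rw [PySem.List.mem_pyRange_one] at hj
  obtain ⟨hj0, hjn⟩ := hj
  simp only [Function.comp]
  have e3 : (j + 1).toNat = j.toNat + 1 := by omega
  simp only [PySem.List.slice_to r hj0, PySem.List.slice_from r (by omega : (0:Int) ≤ j + 1), e3]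
  rw [aValid_eq]

theorem port_eq (l : List (List Int)) : checkValidReports l = checkValidReports_alt l := by
  unfold checkValidReports checkValidReports_alt
  rw [PySem.List.foldl_pyRange_zero_pyGetD' l [] (fun count r =>
    if aScan ((PySem.List.pyRange 0 (r.length : Int) 1).map (fun j =>
      PySem.List.slice r none (some j) ++ PySem.List.slice r (some (j + 1)) none)) then count + 1
    else count) 0]
  have hfun : (fun (count : Int) (r : List Int) =>
      if aScan ((PySem.List.pyRange 0 (r.length : Int) 1).map (fun j =>
        PySem.List.slice r none (some j) ++ PySem.List.slice r (some (j + 1)) none)) then count + 1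
      else count)
      = (fun (count : Int) (r : List Int) =>
          if bRepairableDir r 1 3 || bRepairableDir r (-3) (-1) then count + 1 else count) := by
    funext count r
    rw [cond_eq r]
  rw [hfun]

-- ===== VERDICT (by name: the statement is the Claim_ definition above) =====
theorem checkValidReports_spec : Claim_equal_checkValidReports := by
  intro l _
  unfold Spec_checkValidReports
  exact port_eq l
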